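-- pv_equiv track=rewrite | github.com/pypi-data/pypi-mirror-183 | packages/pyparagraph/pyparagraph-0.0.7.tar.gz/pyparagraph-0.0.7/src/pyparagraph/linebreak.py | fix_hyphenation
-- ===== SOURCE A (Python) =====
-- def fix_hyphenation(words):
--     rv = []
--     for word in words:
--         if not word[0].isalpha() and rv:
--             rv[-1]+= word
--         else:
--             rv.append(word)
--     return rv
-- ===== SOURCE B (Python) =====
-- def fix_hyphenation(words):
--     # Two-pointer scan: j runs to the end of each group (first word plus the
--     # following non-alpha-starting tokens), then the group is joined in one go.
--     words = list(words)
--     out = []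
--     n = len(words)
--     i = 0
--     while i < n:
--         j = i + 1
--         while j < n and not words[j][0].isalpha():
--             j += 1
--         out.append(''.join(words[i:j]))
--         i = j
--     return out
-- ===== Notes on version B (the rewrite author's own statement) =====
-- stated objective: alternative
-- what changed: Replaced the single accumulator loop that mutates the last element of rv with a two-pointer scan that finds each group's end index and joins the slice in one go.
import Mathlib
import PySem

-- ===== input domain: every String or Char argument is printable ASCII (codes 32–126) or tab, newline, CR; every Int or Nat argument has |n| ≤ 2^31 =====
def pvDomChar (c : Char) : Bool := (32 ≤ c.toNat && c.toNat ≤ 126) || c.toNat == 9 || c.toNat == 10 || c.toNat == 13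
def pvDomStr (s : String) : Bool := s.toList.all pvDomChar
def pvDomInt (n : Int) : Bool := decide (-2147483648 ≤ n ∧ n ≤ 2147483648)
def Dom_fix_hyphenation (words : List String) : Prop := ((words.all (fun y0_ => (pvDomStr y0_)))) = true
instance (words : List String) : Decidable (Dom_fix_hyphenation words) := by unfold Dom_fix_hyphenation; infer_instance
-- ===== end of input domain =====

-- B replaces A's accumulator loop (which mutates rv[-1]) with a two-pointer scan
-- that finds each group's end index and joins the slice; alternative, not faster.


-- ===== PORT A =====
-- one loop step: 'if not word[0].isalpha() and rv: rv[-1] += word else: rv.append(word)'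
-- word[0] is always evaluated first; none = IndexError (outside Pre_), the none branch is arbitrary.
def fixStepA (rv : List String) (word : String) : List String :=
  match PySem.Str.pyGet? word 0 with
  | none => rv
  | some c =>
    if h : ¬ (PySem.Chars.isalpha c = true) ∧ rv ≠ [] then
      rv.dropLast ++ [rv.getLast h.2 ++ word]     -- rv[-1] += word
    else
      rv ++ [word]

def fix_hyphenation (words : List String) : List String :=
  words.foldl fixStepA []

-- ===== PORT B =====
-- 'not words[j][0].isalpha()' of the inner while condition (none = IndexError, outside Pre_)
def nonAlphaStartB (w : String) : Bool :=
  match PySem.Str.pyGet? w 0 with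
  | none => true
  | some c => ! PySem.Chars.isalpha c

-- inner while loop: advance j past the non-alpha-starting tokens
def innerB (words : List String) (j : Nat) : Nat :=
  if h : j < words.length then
    if nonAlphaStartB words[j] then innerB words (j + 1) else j
  else j
termination_by words.length - j

theorem innerB_ge (words : List String) (j : Nat) : j ≤ innerB words j := by
  unfold innerB
  split_ifs with h1 h2
  · exact Nat.le_trans (Nat.le_succ j) (innerB_ge words (j + 1))
  · exact Nat.le_refl j
  · exact Nat.le_refl j
termination_by words.length - j

-- outer while loop: one group (words[i:j]) per iteration
def outerB (words : List String) (i : Nat) (out : List String) : List String :=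
  if _h : i < words.length then
    let j := innerB words (i + 1)
    outerB words j (out ++ [PySem.Str.join "" (PySem.List.slice words (some (i : Int)) (some (j : Int)))])
  else out
termination_by words.length - i
decreasing_by
  have := innerB_ge words (i + 1)
  omega

def fix_hyphenation_alt (words : List String) : List String :=
  outerB words 0 []

-- ===== PRECONDITION & SPEC =====
-- Pre_ excludes exactly the inputs containing an empty word, on which A raises IndexError.
def Pre_fix_hyphenation (words : List String) : Prop := ∀ w ∈ words, w ≠ ""
instance (words : List String) : Decidable (Pre_fix_hyphenation words) := by
  unfold Pre_fix_hyphenation; infer_instance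

def pvWitness_fix_hyphenation : List String := ["foo", "-bar", "x", "!", "?y"]

def Spec_fix_hyphenation (words : List String) (out : List String) : Prop := out = fix_hyphenation_alt words
instance (words : List String) (out : List String) : Decidable (Spec_fix_hyphenation words out) := by unfold Spec_fix_hyphenation; infer_instance

-- ===== CLAIM (what is proved, stated in full; the proofs are below) =====
def Claim_equal_fix_hyphenation : Prop := ∀ (words : List String), Dom_fix_hyphenation words → Pre_fix_hyphenation words → Spec_fix_hyphenation words (fix_hyphenation words)

-- ===== LEMMAS AND PROOFS =====

-- proof-side reference function: the groups, one per recursion step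
def groupsSpec : List String → List String
  | [] => []
  | w :: ws =>
    ((ws.takeWhile nonAlphaStartB).foldl (· ++ ·) w) :: groupsSpec (ws.dropWhile nonAlphaStartB)
termination_by words => words.length
decreasing_by
  simpa using Nat.lt_succ_of_le (List.length_dropWhile_le _ _)

-- a nonempty word has a first character
theorem pyGet0_of_ne_nil (w : String) (h : w ≠ "") :
    ∃ c, PySem.Str.pyGet? w 0 = some c := by
  have hl : w.toList ≠ [] := fun hn => h (by simpa using congrArg String.ofList hn)
  cases he : w.toList with
  | nil => exact absurd he hl
  | cons c cs => exact ⟨c, by simp [PySem.Str.pyGet?, PySem.List.pyGet?, PySem.List.pyIdx?, he]⟩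

theorem fixStepA_ne_nil (rv : List String) (w : String) (h : rv ≠ []) :
    fixStepA rv w ≠ [] := by
  unfold fixStepA
  cases PySem.Str.pyGet? w 0 with
  | none => exact h
  | some c => dsimp only; split_ifs <;> simp

-- A's step only touches the last element of a nonempty rv
theorem fixStepA_append (pre rv : List String) (w : String) (h : rv ≠ []) :
    fixStepA (pre ++ rv) w = pre ++ fixStepA rv w := by
  unfold fixStepA
  cases PySem.Str.pyGet? w 0 with
  | none => rfl
  | some c =>
    dsimp only
    split_ifs with h1 h2 h2
    · rw [List.dropLast_append_of_ne_nil h, List.getLast_append_of_right_ne_nil _ _ h, List.append_assoc]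
    · exact absurd ⟨h1.1, h⟩ h2
    · exact absurd ⟨h2.1, by simp [h]⟩ h1
    · exact List.append_assoc pre rv [w]

theorem foldl_fixStepA_prefix (ws : List String) (pre rv : List String) (h : rv ≠ []) :
    List.foldl fixStepA (pre ++ rv) ws = pre ++ List.foldl fixStepA rv ws := by
  induction ws generalizing rv with
  | nil => rfl
  | cons v ws ih =>
    rw [List.foldl_cons, List.foldl_cons, fixStepA_append pre rv v h,
        ih (fixStepA rv v) (fixStepA_ne_nil rv v h)]

-- main invariant of A's loop: folding from [a] builds exactly the groups of (a :: ws)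
theorem foldl_fixStepA_singleton (ws : List String) (a : String)
    (h : ∀ w ∈ ws, w ≠ "") :
    List.foldl fixStepA [a] ws = groupsSpec (a :: ws) := by
  induction ws generalizing a with
  | nil => simp [groupsSpec]
  | cons v ws ih =>
    have hv : v ≠ "" := h v (List.mem_cons_self ..)
    have h' : ∀ w ∈ ws, w ≠ "" := fun u hu => h u (List.mem_cons_of_mem _ hu)
    obtain ⟨c, hc⟩ := pyGet0_of_ne_nil v hv
    by_cases hal : PySem.Chars.isalpha c = true
    · have hstep : fixStepA [a] v = [a] ++ [v] := by
        unfold fixStepA; rw [hc]; simp [hal]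
      have hna : nonAlphaStartB v = false := by
        unfold nonAlphaStartB; rw [hc]; simp [hal]
      rw [List.foldl_cons, hstep,
        foldl_fixStepA_prefix ws [a] [v] (by simp), ih v h']
      simp [groupsSpec, hna]
    · have hstep : fixStepA [a] v = [a ++ v] := by
        unfold fixStepA; rw [hc]; simp [hal]
      have hna : nonAlphaStartB v = true := by
        unfold nonAlphaStartB; rw [hc]; simp [hal]
      rw [List.foldl_cons, hstep, ih (a ++ v) h']
      simp [groupsSpec, hna]

theorem fix_hyphenation_eq_groupsSpec (words : List String) (h : ∀ w ∈ words, w ≠ "") :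
    fix_hyphenation words = groupsSpec words := by
  unfold fix_hyphenation
  cases words with
  | nil => simp [groupsSpec]
  | cons w ws =>
    obtain ⟨c, hc⟩ := pyGet0_of_ne_nil w (h w (List.mem_cons_self ..))
    have hstep : fixStepA [] w = [w] := by
      unfold fixStepA; rw [hc]; simp
    rw [List.foldl_cons, hstep]
    exact foldl_fixStepA_singleton ws w (fun v hv => h v (List.mem_cons_of_mem _ hv))

-- take/drop at the takeWhile length give takeWhile/dropWhile
theorem take_takeWhile_length (p : String → Bool) (l : List String) :
    l.take (l.takeWhile p).length = l.takeWhile p := by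
  induction l with
  | nil => rfl
  | cons a l ih =>
    rw [List.takeWhile_cons]
    by_cases hp : p a = true
    · simp [hp, ih]
    · simp [hp]

theorem drop_takeWhile_length (p : String → Bool) (l : List String) :
    l.drop (l.takeWhile p).length = l.dropWhile p := by
  induction l with
  | nil => rfl
  | cons a l ih =>
    rw [List.takeWhile_cons, List.dropWhile_cons]
    by_cases hp : p a = true
    · simp [hp, ih]
    · simp [hp]

-- inner while loop: j advances past exactly the leading non-alpha-starting tokens
theorem innerB_char (words : List String) (j : Nat) :
    innerB words j = j + ((words.drop j).takeWhile nonAlphaStartB).length := by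
  unfold innerB
  split_ifs with h1 h2
  · have hd : words.drop j = words[j] :: words.drop (j + 1) := List.drop_eq_getElem_cons h1
    rw [innerB_char words (j + 1), hd, List.takeWhile_cons, if_pos h2]
    simp; omega
  · have hd : words.drop j = words[j] :: words.drop (j + 1) := List.drop_eq_getElem_cons h1
    rw [hd, List.takeWhile_cons, if_neg h2]
    simp
  · rw [List.drop_eq_nil_of_le (by omega)]
    simp
termination_by words.length - j

-- ''.join over strings is a left fold of append
theorem chars_join_empty_cons (p : List Char) (rest : List (List Char)) :
    PySem.Chars.join [] (p :: rest) = p ++ PySem.Chars.join [] rest := by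
  cases rest with
  | nil => simp [PySem.Chars.join_singleton, PySem.Chars.join_nil]
  | cons q rest => rw [PySem.Chars.join_cons_cons]; simp

theorem foldl_append_toList (gs : List String) (w : String) :
    (gs.foldl (· ++ ·) w).toList = w.toList ++ PySem.Chars.join [] (gs.map String.toList) := by
  induction gs generalizing w with
  | nil => simp [PySem.Chars.join_nil]
  | cons g gs ih =>
    rw [List.foldl_cons, ih (w ++ g), List.map_cons, chars_join_empty_cons]
    simp [List.append_assoc]

theorem join_empty_eq_foldl (w : String) (gs : List String) :
    PySem.Str.join "" (w :: gs) = gs.foldl (· ++ ·) w := by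
  have he : ("".toList : List Char) = [] := by decide
  refine String.toList_inj.mp ?_
  rw [PySem.Str.toList_join, foldl_append_toList, List.map_cons, he, chars_join_empty_cons]

-- outer while loop: it emits the groups of the remaining suffix
theorem outerB_char (words : List String) (i : Nat) (out : List String) :
    outerB words i out = out ++ groupsSpec (words.drop i) := by
  unfold outerB
  split_ifs with h1
  · have hd : words.drop i = words[i] :: words.drop (i + 1) := List.drop_eq_getElem_cons h1
    have hj : innerB words (i + 1) = (i + 1) + ((words.drop (i + 1)).takeWhile nonAlphaStartB).length :=
      innerB_char words (i + 1)
    have hslice : PySem.List.slice words (some (i : Int)) (some ((innerB words (i + 1)) : Int))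
        = words[i] :: (words.drop (i + 1)).takeWhile nonAlphaStartB := by
      rw [PySem.List.slice_natCast, hj, hd]
      have : (i + 1 + ((words.drop (i + 1)).takeWhile nonAlphaStartB).length) - i
          = ((words.drop (i + 1)).takeWhile nonAlphaStartB).length + 1 := by omega
      rw [this, List.take_succ_cons, take_takeWhile_length]
    have hdropj : words.drop (innerB words (i + 1)) = (words.drop (i + 1)).dropWhile nonAlphaStartB := by
      rw [hj, ← List.drop_drop, drop_takeWhile_length]
    rw [outerB_char words (innerB words (i + 1)), hslice, join_empty_eq_foldl, hdropj, hd, groupsSpec]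
    simp
  · rw [List.drop_eq_nil_of_le (by omega)]
    simp [groupsSpec]
termination_by words.length - i
decreasing_by
  have := innerB_ge words (i + 1)
  omega

-- ===== VERDICT (by name: the statement is the Claim_ definition above) =====
theorem fix_hyphenation_spec : Claim_equal_fix_hyphenation := by
  intro words _hdom hpre
  unfold Spec_fix_hyphenation fix_hyphenation_alt
  rw [outerB_char words 0 [], fix_hyphenation_eq_groupsSpec words hpre]
  simp
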